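-- pv_equiv track=rewrite | github.com/kwonhyeonjin00/codetree-TILs | 241002/2개 이상의 알파벳/more-than-one-alphabet.py | check
-- ===== SOURCE A (Python) =====
-- def check(s):
--     if len(s) == 1:
--         return False
--     else:
--         for i in range(len(s)-1):
--             if s[i] != s[i+1]:
--                 return True
--     return False
-- ===== SOURCE B (Python) =====
-- def check(s):
--     return len(set(s)) > 1
-- ===== Notes on version B (the rewrite author's own statement) =====
-- stated objective: idiomatic
-- what changed: B replaces the indexed scan over adjacent character pairs (with a length-1 special case) by building the set of distinct characters and testing whether it has more than one element.
import Mathlib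
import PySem

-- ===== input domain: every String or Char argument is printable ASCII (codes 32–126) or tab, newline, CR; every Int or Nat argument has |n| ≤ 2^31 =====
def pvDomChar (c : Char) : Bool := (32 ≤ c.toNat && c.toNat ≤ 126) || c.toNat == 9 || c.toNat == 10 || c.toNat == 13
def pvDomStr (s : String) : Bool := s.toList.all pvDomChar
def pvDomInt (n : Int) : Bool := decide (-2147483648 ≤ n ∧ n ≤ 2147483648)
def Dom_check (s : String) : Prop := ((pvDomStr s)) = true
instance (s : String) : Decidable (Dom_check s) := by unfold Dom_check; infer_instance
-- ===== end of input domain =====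

-- B scans no index pairs: it builds the set of distinct characters and tests |set(s)| > 1 (idiomatic; same behaviour, empty/singleton give False).
-- ===== PORT A =====
def check (s : String) : Bool :=
  let l := s.toList
  if l.length == 1 then false
  else (PySem.List.pyRange 0 ((l.length : Int) - 1) 1).any (fun i =>
    PySem.List.pyGet? l i != PySem.List.pyGet? l (i + 1))

-- ===== PORT B =====
def check_alt (s : String) : Bool :=
  decide (1 < (PySem.Set.ofList s.toList).length)

-- ===== PRECONDITION & SPEC =====
def Spec_check (s : String) (out : Bool) : Prop := out = check_alt s
instance (s : String) (out : Bool) : Decidable (Spec_check s out) := by unfold Spec_check; infer_instance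

-- ===== CLAIM (what is proved, stated in full; the proofs are below) =====
def Claim_equal_check : Prop := ∀ (s : String), Dom_check s → Spec_check s (check s)

-- ===== LEMMAS AND PROOFS =====

-- adjacent-mismatch existence ↔ some element differs from the head
lemma adj_iff (t : List Char) (a : Char) :
    (∃ i < t.length, (a :: t)[i]? ≠ (a :: t)[i+1]?) ↔ ∃ c ∈ t, c ≠ a := by
  induction t generalizing a with
  | nil => simp
  | cons b t' ih =>
    constructor
    · rintro ⟨i, hi, hne⟩
      cases i with
      | zero =>
        simp at hne
        exact ⟨b, by simp, fun h => hne h.symm⟩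
      | succ j =>
        have : ∃ c ∈ t', c ≠ b := (ih b).mp ⟨j, by simpa using hi, by simpa using hne⟩
        obtain ⟨c, hc, hcb⟩ := this
        by_cases hab : a = b
        · exact ⟨c, by simp [hc], by simpa [hab] using hcb⟩
        · exact ⟨b, by simp, fun h => hab h.symm⟩
    · rintro ⟨c, hc, hca⟩
      by_cases hab : a = b
      · rcases List.mem_cons.mp hc with rfl | hc'
        · exact absurd hab.symm hca
        · obtain ⟨j, hj, hne⟩ := (ih b).mpr ⟨c, hc', by simpa [hab] using hca⟩
          exact ⟨j + 1, by simpa using hj, by simpa using hne⟩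
      · exact ⟨0, by simp, by simpa using fun h => hab h⟩

lemma foldl_const (t : List Char) (a : Char) (h : ∀ c ∈ t, c = a) :
    t.foldl PySem.Set.add [a] = [a] := by
  induction t with
  | nil => rfl
  | cons b t' ih =>
    have hb : b = a := h b (by simp)
    simp only [List.foldl_cons, PySem.Set.add, hb, PySem.Set.contains]
    simp
    exact ih (fun c hc => h c (by simp [hc]))

-- set(l) stays a singleton exactly when every element equals the head
lemma ofList_const (t : List Char) (a : Char) (h : ∀ c ∈ t, c = a) :
    PySem.Set.ofList (a :: t) = [a] := by
  have h0 : PySem.Set.ofList (a :: t) = t.foldl PySem.Set.add [a] := by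
    simp [PySem.Set.ofList_eq_foldl, List.foldl_cons, PySem.Set.add, PySem.Set.contains]
  rw [h0, foldl_const t a h]

lemma card_iff (t : List Char) (a : Char) :
    1 < (PySem.Set.ofList (a :: t)).length ↔ ∃ c ∈ t, c ≠ a := by
  constructor
  · intro h
    by_contra hno
    simp only [not_exists, not_and, not_not, ne_eq] at hno
    rw [ofList_const t a hno] at h
    simp at h
  · rintro ⟨c, hc, hca⟩
    have ha : a ∈ PySem.Set.ofList (a :: t) := by
      rw [PySem.Set.mem_ofList]; simp
    have hcm : c ∈ PySem.Set.ofList (a :: t) := by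
      rw [PySem.Set.mem_ofList]; simp [hc]
    rcases hl : PySem.Set.ofList (a :: t) with _ | ⟨x, _ | ⟨y, ys⟩⟩
    · rw [hl] at ha; simp at ha
    · rw [hl] at ha hcm
      simp at ha hcm
      exact absurd (hcm.trans ha.symm) hca
    · simp

lemma check_main (l : List Char) :
    (if l.length == 1 then false
     else (PySem.List.pyRange 0 ((l.length : Int) - 1) 1).any (fun i =>
       PySem.List.pyGet? l i != PySem.List.pyGet? l (i + 1)))
      = decide (1 < (PySem.Set.ofList l).length) := by
  cases l with
  | nil => decide
  | cons a t =>
    by_cases ht : t = []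
    · subst ht
      rw [ofList_const [] a (by simp)]
      simp
    · have hcond : ((a :: t).length == 1) = false := by
        cases t with
        | nil => exact absurd rfl ht
        | cons b t' => simp
      rw [hcond]
      simp only [Bool.false_eq_true, if_false]
      have hlen : ((a :: t).length : Int) - 1 = (t.length : Int) := by
        simp only [List.length_cons]
        push_cast
        ring
      rw [hlen, PySem.List.pyRange_zero_natCast]
      rw [Bool.eq_iff_iff]
      simp only [decide_eq_true_iff]
      rw [card_iff, ← adj_iff t a]
      simp only [List.any_map, List.any_eq_true, List.mem_range, Function.comp]
      constructor
      · rintro ⟨i, hi, hne⟩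
        refine ⟨i, hi, ?_⟩
        have hc : ((i : Int) + 1) = ((i + 1 : Nat) : Int) := by push_cast; ring
        rw [hc, PySem.List.pyGet?_natCast, PySem.List.pyGet?_natCast] at hne
        simpa using hne
      · rintro ⟨i, hi, hne⟩
        refine ⟨i, hi, ?_⟩
        have hc : ((i : Int) + 1) = ((i + 1 : Nat) : Int) := by push_cast; ring
        rw [hc, PySem.List.pyGet?_natCast, PySem.List.pyGet?_natCast]
        simpa using hne

-- ===== VERDICT (by name: the statement is the Claim_ definition above) =====
theorem check_spec : Claim_equal_check := by
  intro s _
  unfold Spec_check check check_alt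
  exact check_main s.toList
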